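-- pv_equiv track=rewrite | github.com/romjerome/genetic_privacy | predict/common_segments.py | _consolidate_sequence
-- ===== SOURCE A (Python) =====
-- def _consolidate_sequence(sequence):
--     """
--     Takes a list of elements of the form (a, b), (c, d), ...  and
--     merges elements where b = c such that (a, b), (c, d) becomes (a, d)
--     """
--     assert len(sequence) > 1
--     i = 0
--     j = 1
--     consolidated = []
--     while j < len(sequence):
--         if sequence[j - 1][1] != sequence[j][0]:
--             consolidated.append((sequence[i][0], sequence[j - 1][1]))
--             i = j
--         j += 1
--     consolidated.append((sequence[i][0], sequence[j - 1][1]))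
--     return consolidated
-- ===== SOURCE B (Python) =====
-- def _consolidate_sequence(sequence):
--     """
--     Takes a list of elements of the form (a, b), (c, d), ...  and
--     merges elements where b = c such that (a, b), (c, d) becomes (a, d)
--     """
--     assert len(sequence) > 1
--     # walk the sequence BACKWARDS, building the result in reversed order:
--     # merge an element into the interval at the end of `rev` when it touches it
--     rev = [(sequence[-1][0], sequence[-1][1])]
--     for p in reversed(sequence[:-1]):
--         q = rev[-1]
--         if p[1] != q[0]:
--             rev.append((p[0], p[1]))
--         else:
--             rev[-1] = (p[0], q[1])
--     return rev[::-1]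
-- ===== Notes on version B (the rewrite author's own statement) =====
-- stated objective: alternative
-- what changed: Replaces the forward while-loop with i/j index bookkeeping by a single backward pass that merges each element into the last interval of a reversed accumulator and reverses at the end; Pre_ excludes sequences of length <= 1, on which A's assert raises AssertionError.
import Mathlib
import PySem

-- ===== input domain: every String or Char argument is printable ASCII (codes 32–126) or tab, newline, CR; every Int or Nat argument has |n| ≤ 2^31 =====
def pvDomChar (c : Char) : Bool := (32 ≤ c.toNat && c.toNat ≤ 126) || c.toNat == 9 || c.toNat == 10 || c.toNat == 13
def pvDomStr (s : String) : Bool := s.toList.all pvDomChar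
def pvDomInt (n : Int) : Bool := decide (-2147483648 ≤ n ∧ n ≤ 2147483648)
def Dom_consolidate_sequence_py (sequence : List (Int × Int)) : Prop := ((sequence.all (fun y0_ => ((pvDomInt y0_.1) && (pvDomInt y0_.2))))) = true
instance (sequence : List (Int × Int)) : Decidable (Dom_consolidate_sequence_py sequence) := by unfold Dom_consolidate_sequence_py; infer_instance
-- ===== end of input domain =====

-- B replaces A's forward index while-loop by a single backward pass that merges into the
-- tail of a reversed accumulator and reverses at the end (alternative decomposition, same cost).


-- ===== PORT A =====
-- the while-loop of A; indices i, j are Nat: in Python they start at 0/1 and only ever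
-- increase, and under Pre_ every access is in range, so getD with a dummy default is exact
def aLoop (sequence : List (Int × Int)) (i j : Nat) (consolidated : List (Int × Int)) :
    List (Int × Int) :=
  if j < sequence.length then
    if (sequence.getD (j - 1) (0, 0)).2 ≠ (sequence.getD j (0, 0)).1 then
      aLoop sequence j (j + 1)
        (consolidated ++ [((sequence.getD i (0, 0)).1, (sequence.getD (j - 1) (0, 0)).2)])
    else
      aLoop sequence i (j + 1) consolidated
  else
    consolidated ++ [((sequence.getD i (0, 0)).1, (sequence.getD (j - 1) (0, 0)).2)]
termination_by sequence.length - j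

def consolidate_sequence_py (sequence : List (Int × Int)) : List (Int × Int) :=
  aLoop sequence 0 1 []

-- ===== PORT B =====
-- one iteration of B's backward loop: q = rev[-1]; append or merge into the last slot
def bstep (rev : List (Int × Int)) (p : Int × Int) : List (Int × Int) :=
  match rev.getLast? with
  | none => [(p.1, p.2)]  -- unreachable: rev is never empty
  | some q => if p.2 ≠ q.1 then rev ++ [(p.1, p.2)] else rev.dropLast ++ [(p.1, q.2)]

def consolidate_sequence_py_alt (sequence : List (Int × Int)) : List (Int × Int) :=
  ((((PySem.List.slice sequence none (some (-1))).reverse).foldl bstep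
    [((PySem.List.pyGetD sequence (-1) (0, 0)).1, (PySem.List.pyGetD sequence (-1) (0, 0)).2)]).reverse)

-- ===== PRECONDITION & SPEC =====
-- Pre_ excludes sequences of length ≤ 1, on which A's `assert len(sequence) > 1` raises
def Pre_consolidate_sequence_py (sequence : List (Int × Int)) : Prop := 1 < sequence.length
instance (sequence : List (Int × Int)) : Decidable (Pre_consolidate_sequence_py sequence) := by
  unfold Pre_consolidate_sequence_py; infer_instance
def pvWitness_consolidate_sequence_py : (List (Int × Int)) := [(0, 1), (1, 2)]

def Spec_consolidate_sequence_py (sequence : List (Int × Int)) (out : List (Int × Int)) : Prop :=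
  out = consolidate_sequence_py_alt sequence
instance (sequence : List (Int × Int)) (out : List (Int × Int)) :
    Decidable (Spec_consolidate_sequence_py sequence out) := by
  unfold Spec_consolidate_sequence_py; infer_instance

-- ===== CLAIM (what is proved, stated in full; the proofs are below) =====
def Claim_equal_consolidate_sequence_py : Prop :=
  ∀ (sequence : List (Int × Int)), Dom_consolidate_sequence_py sequence →
    Pre_consolidate_sequence_py sequence →
    Spec_consolidate_sequence_py sequence (consolidate_sequence_py sequence)

-- ===== LEMMAS AND PROOFS =====

-- common recursive description: consolidate with a carried running interval
def cgo (start : Int × Int) (rest : List (Int × Int)) : List (Int × Int) :=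
  match rest with
  | [] => [start]
  | h :: t => if start.2 ≠ h.1 then start :: cgo h t else cgo (start.1, h.2) t

-- cgo on a nonempty list (first element is the initial running interval)
def clist (L : List (Int × Int)) : List (Int × Int) :=
  match L with
  | [] => []
  | x :: xs => cgo x xs

-- B's per-element step, phrased on the un-reversed output
def cstep (p : Int × Int) (out : List (Int × Int)) : List (Int × Int) :=
  match out with
  | [] => [p]
  | q :: rest => if p.2 ≠ q.1 then p :: q :: rest else (p.1, q.2) :: rest

lemma aLoop_eq_cgo (s : List (Int × Int)) :
    ∀ (fuel j i : Nat) (acc : List (Int × Int)), fuel = s.length - j →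
      aLoop s i j acc =
        acc ++ cgo ((s.getD i (0, 0)).1, (s.getD (j - 1) (0, 0)).2) (s.drop j) := by
  intro fuel
  induction fuel with
  | zero =>
    intro j i acc hf
    rw [aLoop]
    have hj : ¬ j < s.length := by omega
    simp only [hj, if_false]
    rw [List.drop_eq_nil_of_le (by omega)]
    simp [cgo]
  | succ f ih =>
    intro j i acc hf
    rw [aLoop]
    by_cases hj : j < s.length
    · rw [if_pos hj]
      have hdrop := List.getElem_cons_drop hj
      have hgd : s.getD j (0, 0) = s[j] := List.getD_eq_getElem s (0, 0) hj
      rw [← hdrop, cgo, hgd]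
      by_cases hne : (s.getD (j - 1) (0, 0)).2 ≠ s[j].1
      · rw [if_pos hne, if_pos hne, ih (j + 1) j _ (by omega), Nat.add_sub_cancel, hgd]
        simp
      · rw [if_neg hne, if_neg hne, ih (j + 1) i acc (by omega), Nat.add_sub_cancel, hgd]
    · rw [if_neg hj]
      rw [List.drop_eq_nil_of_le (by omega)]
      simp [cgo]

lemma cgo_start_shift :
    ∀ (t : List (Int × Int)) (e : Int), ∃ e' r, ∀ a : Int, cgo (a, e) t = (a, e') :: r := by
  intro t
  induction t with
  | nil => intro e; exact ⟨e, [], fun a => rfl⟩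
  | cons h t ih =>
    intro e
    by_cases hne : e ≠ h.1
    · exact ⟨e, cgo h t, fun a => by simp [cgo, hne]⟩
    · obtain ⟨e', r, hr⟩ := ih h.2
      exact ⟨e', r, fun a => by rw [cgo, if_neg hne]; exact hr a⟩

lemma cgo_cstep (t : List (Int × Int)) (h x : Int × Int) :
    cgo x (h :: t) = cstep x (cgo h t) := by
  obtain ⟨e', r, hr⟩ := cgo_start_shift t h.2
  have hh : cgo h t = (h.1, e') :: r := by rw [← hr h.1]
  rw [cgo, hh, cstep]
  by_cases hne : x.2 ≠ h.1
  · simp [hne]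
  · have he := not_not.mp hne
    simp [he, hr x.1]

lemma foldr_cstep_eq_clist :
    ∀ (l : List (Int × Int)) (z : Int × Int), l.foldr cstep [z] = clist (l ++ [z]) := by
  intro l
  induction l with
  | nil => intro z; simp [clist, cgo]
  | cons x t ih =>
    intro z
    have hne : t ++ [z] ≠ [] := by simp
    obtain ⟨h, rest, hrest⟩ := List.exists_cons_of_ne_nil hne
    rw [List.foldr_cons, ih z, List.cons_append, clist, hrest, clist, ← cgo_cstep]

lemma cstep_ne_nil (p : Int × Int) (out : List (Int × Int)) : cstep p out ≠ [] := by
  cases out with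
  | nil => simp [cstep]
  | cons q r => rw [cstep]; split_ifs <;> simp

lemma foldr_cstep_ne_nil (l : List (Int × Int)) (m : List (Int × Int)) (hm : m ≠ []) :
    l.foldr cstep m ≠ [] := by
  cases l with
  | nil => exact hm
  | cons x t => exact cstep_ne_nil x _

lemma bstep_rev (m : List (Int × Int)) (p : Int × Int) (hm : m ≠ []) :
    bstep m.reverse p = (cstep p m).reverse := by
  obtain ⟨q, rest, rfl⟩ := List.exists_cons_of_ne_nil hm
  rw [bstep, cstep]
  simp only [List.reverse_cons, List.getLast?_concat]
  by_cases hne : p.2 ≠ q.1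
  · simp [hne]
  · have he := not_not.mp hne
    simp [he]

lemma foldl_bstep_rev :
    ∀ (l m : List (Int × Int)), m ≠ [] →
      (l.reverse).foldl bstep m.reverse = (l.foldr cstep m).reverse := by
  intro l
  induction l with
  | nil => intro m _; rfl
  | cons x t ih =>
    intro m hm
    rw [List.reverse_cons, List.foldl_append, List.foldl_cons, List.foldl_nil,
      ih m hm, bstep_rev _ _ (foldr_cstep_ne_nil t m hm), List.foldr_cons]

lemma alt_eq_clist (s : List (Int × Int)) (hs : s ≠ []) :
    consolidate_sequence_py_alt s = clist s := by
  unfold consolidate_sequence_py_alt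
  rw [PySem.List.pyGetD_neg_one s (0, 0) hs, PySem.List.slice_to_neg_one]
  have heta : (((s.getLast hs).1, (s.getLast hs).2) : Int × Int) = s.getLast hs := rfl
  rw [heta]
  have := foldl_bstep_rev s.dropLast [s.getLast hs] (by simp)
  simp only [List.reverse_singleton] at this
  rw [this, List.reverse_reverse, foldr_cstep_eq_clist, List.dropLast_concat_getLast hs]

-- ===== VERDICT (by name: the statement is the Claim_ definition above) =====
theorem consolidate_sequence_py_spec : Claim_equal_consolidate_sequence_py := by
  intro s _ hpre
  unfold Pre_consolidate_sequence_py at hpre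
  unfold Spec_consolidate_sequence_py
  obtain ⟨x, xs, rfl⟩ := List.exists_cons_of_ne_nil (by intro h; rw [h] at hpre; simp at hpre :
    (s ≠ []))
  rw [alt_eq_clist _ (by simp), clist]
  unfold consolidate_sequence_py
  rw [aLoop_eq_cgo _ ((x :: xs).length - 1) 1 0 [] rfl]
  simp
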